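-- pv_equiv track=rewrite | github.com/pg45962/aasb_grupo8 | codigo/MyBlast.py | getHits
-- ===== SOURCE A (Python) =====
-- def getHits(seq,m,w):
--     """
--
--     Tem como entradas o Mapa da sequência query (criada pela função anterior), Sequência na qual procurar (e.g. da BD) e Valor do tamanho das palavras (W). O seu objetivo é descobrir todas as co-ocorrências de palavras de tamanho W entre a query e a sequência (só serão considerados matches perfeitos de tamanho W). O resultado é uma lista de hits; cada hit é um tuplo, com o 1º elemento sendo a posição da palavra na query e o 2º sendo a posição da palavra na sequência.
--
--     """
--     res=[]
--     i=0
--     while i<=len(seq)-w: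
--         s=seq[i:i+w]
--         if s in m:
--             for q in m[s]:
--                 res.append((q,i))
--         i+=1
--     return res
-- ===== SOURCE B (Python) =====
-- def getHits(seq, m, w):
--     # Index the positions of each length-w window of seq that is a query word
--     # (one pass), expand hits per query-map entry (query positions outer, seq
--     # positions inner), then stable-sort the hits back into seq-position order.
--     seqidx = {}
--     for i in range(len(seq) - w + 1):
--         s = seq[i:i+w]
--         if s in m:
--             seqidx.setdefault(s, []).append(i)
--     res = []
--     for s, qs in m.items():
--         if s in seqidx:
--             for q in qs:
--                 for i in seqidx[s]:
--                     res.append((q, i))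
--     res.sort(key=lambda h: h[1])
--     return res
-- ===== Notes on version B (the rewrite author's own statement) =====
-- stated objective: alternative
-- what changed: B inverts the control flow: it builds a position index of the length-w windows of seq that are query words in one pass, expands hits per query-map entry (query positions outer, seq positions inner), and stable-sorts the hit list by seq position to restore A's order.
import Mathlib
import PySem

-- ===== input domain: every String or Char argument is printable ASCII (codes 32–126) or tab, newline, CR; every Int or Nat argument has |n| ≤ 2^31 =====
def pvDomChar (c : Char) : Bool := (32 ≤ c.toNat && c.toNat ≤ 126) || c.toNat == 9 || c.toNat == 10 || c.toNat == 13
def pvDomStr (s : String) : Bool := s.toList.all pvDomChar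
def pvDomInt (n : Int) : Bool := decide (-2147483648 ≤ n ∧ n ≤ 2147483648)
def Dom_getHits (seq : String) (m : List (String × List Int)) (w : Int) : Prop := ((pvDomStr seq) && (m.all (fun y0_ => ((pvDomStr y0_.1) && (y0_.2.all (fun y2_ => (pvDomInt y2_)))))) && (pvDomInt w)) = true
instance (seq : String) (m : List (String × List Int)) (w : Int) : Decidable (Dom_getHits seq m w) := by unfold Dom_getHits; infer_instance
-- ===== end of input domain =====

-- B builds a window→positions index of seq in one pass, expands hits per query-map
-- entry and stable-sorts by seq position, instead of A's per-position map lookup.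

-- seq[i:i+w], used by both ports
def pvSub (seq : String) (w i : Int) : String := PySem.Str.slice seq (some i) (some (i + w))

-- ===== PORT A =====
def getHitsGo (seq : String) (m : List (String × List Int)) (w : Int) (i : Int) (res : List (Int × Int)) : List (Int × Int) :=
  if _h : i ≤ PySem.Str.len seq - w then
    let s := pvSub seq w i
    let res' :=
      match List.find? (fun p => p.1 == s) m with
      | some p => res ++ p.2.map (fun q => (q, i))
      | none => res
    getHitsGo seq m w (i + 1) res'
  else res
termination_by (PySem.Str.len seq - w + 1 - i).toNat
decreasing_by omega

def getHits (seq : String) (m : List (String × List Int)) (w : Int) : List (Int × Int) :=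
  getHitsGo seq m w 0 []

-- ===== PORT B =====
def getHits_alt (seq : String) (m : List (String × List Int)) (w : Int) : List (Int × Int) :=
  let seqidx : PySem.Dict String (List Int) :=
    (PySem.List.pyRange 0 (PySem.Str.len seq - w + 1)).foldl
      (fun d i =>
        if m.any (fun p => p.1 == pvSub seq w i) then d.modify (pvSub seq w i) [] (fun l => l ++ [i])
        else d) PySem.Dict.empty
  let res : List (Int × Int) :=
    m.foldl (fun acc p =>
      match seqidx.get? p.1 with
      | some is => acc ++ p.2.flatMap (fun q => is.map (fun i => (q, i)))
      | none => acc) []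
  PySem.List.sorted res (fun h => h.2)

-- ===== PRECONDITION & SPEC =====
-- Pre_ excludes only association lists with duplicate string keys: both Pythons receive
-- m as a dict, which cannot hold duplicate keys, so no Python-reachable input is excluded.
def Pre_getHits (seq : String) (m : List (String × List Int)) (w : Int) : Prop :=
  (m.map Prod.fst).Nodup
instance (seq : String) (m : List (String × List Int)) (w : Int) : Decidable (Pre_getHits seq m w) := by unfold Pre_getHits; infer_instance

def pvWitness_getHits : String × (List (String × List Int)) × Int := ("ab", [("a", [0])], 1)

def Spec_getHits (seq : String) (m : List (String × List Int)) (w : Int) (out : List (Int × Int)) : Prop := out = getHits_alt seq m w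
instance (seq : String) (m : List (String × List Int)) (w : Int) (out : List (Int × Int)) : Decidable (Spec_getHits seq m w out) := by unfold Spec_getHits; infer_instance

-- ===== CLAIM (what is proved, stated in full; the proofs are below) =====
def Claim_equal_getHits : Prop := ∀ (seq : String) (m : List (String × List Int)) (w : Int), Dom_getHits seq m w → Pre_getHits seq m w → Spec_getHits seq m w (getHits seq m w)

-- ===== LEMMAS AND PROOFS =====

-- the valid window positions
def pvPos (seq : String) (w : Int) : List Int := PySem.List.pyRange 0 (PySem.Str.len seq - w + 1)
-- positions where window equals s
def pvOcc (seq : String) (w : Int) (s : String) : List Int := (pvPos seq w).filter (fun i => pvSub seq w i == s)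
-- positions where the window equals s, restricted to windows that are query words
def pvOcc' (seq : String) (m : List (String × List Int)) (w : Int) (s : String) : List Int :=
  (pvPos seq w).filter (fun i => m.any (fun p => p.1 == pvSub seq w i) && (pvSub seq w i == s))
-- A's hit group at position i
def pvGrp (seq : String) (m : List (String × List Int)) (w : Int) (i : Int) : List (Int × Int) :=
  match List.find? (fun p => p.1 == pvSub seq w i) m with
  | some p => p.2.map (fun q => (q, i))
  | none => []
-- grouping a list of hits by an ascending key list
def pvChunks (ks : List Int) (xs : List (Int × Int)) : List (Int × Int) :=
  ks.flatMap (fun k => xs.filter (fun x => x.2 == k))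

theorem pv_A_go (seq : String) (m : List (String × List Int)) (w i : Int) (res : List (Int × Int)) :
    getHitsGo seq m w i res = res ++ (PySem.List.pyRange i (PySem.Str.len seq - w + 1)).flatMap (pvGrp seq m w) := by
  fun_induction getHitsGo seq m w i res with
  | case1 i res h s res2 ih =>
      rw [PySem.List.pyRange_one_cons (by omega : i < PySem.Str.len seq - w + 1), List.flatMap_cons, ih]
      unfold pvGrp
      cases hf : List.find? (fun p => p.1 == pvSub seq w i) m <;> simp only [res2, s, hf] <;> simp
  | case2 i res h =>
      rw [PySem.List.pyRange_one_eq_nil (by omega)]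
      simp

theorem pv_A_eq (seq : String) (m : List (String × List Int)) (w : Int) :
    getHits seq m w = (pvPos seq w).flatMap (pvGrp seq m w) := by
  unfold getHits pvPos
  rw [pv_A_go]
  simp

theorem pv_foldl_if {α β : Type} (l : List α) (c : α → Bool) (f : β → α → β) (d : β) :
    l.foldl (fun d i => if c i then f d i else d) d = (l.filter c).foldl f d := by
  induction l generalizing d with
  | nil => rfl
  | cons a l ih =>
      by_cases h : c a <;> simp [h, ih]

theorem pv_seqidx_get? (seq : String) (m : List (String × List Int)) (w : Int) (s : String) :
    ((PySem.List.pyRange 0 (PySem.Str.len seq - w + 1)).foldl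
        (fun d i =>
          if m.any (fun p => p.1 == pvSub seq w i) then d.modify (pvSub seq w i) [] (fun l => l ++ [i])
          else d) PySem.Dict.empty).get? s
      = if pvOcc' seq m w s = [] then none else some (pvOcc' seq m w s) := by
  rw [pv_foldl_if]
  set P := (PySem.List.pyRange 0 (PySem.Str.len seq - w + 1)).filter
      (fun i => m.any (fun p => p.1 == pvSub seq w i)) with hP
  have hocc : pvOcc' seq m w s = P.filter (fun i => pvSub seq w i == s) := by
    unfold pvOcc' pvPos
    rw [hP, List.filter_filter]
    exact List.filter_congr (fun i _ => Bool.and_comm _ _)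
  set D := P.foldl (fun d i => d.modify (pvSub seq w i) [] (fun l => l ++ [i]))
      (PySem.Dict.empty : PySem.Dict String (List Int)) with hD
  have hkeys : D.keys = PySem.Set.ofList (P.map (fun i => pvSub seq w i)) := by
    rw [hD, PySem.Dict.keys_foldl_modify_key _ (fun i => pvSub seq w i) [] (fun _ i l => l ++ [i]),
      PySem.Dict.keys_empty, PySem.Set.update_nil_left]
  have hcont : D.contains s = true ↔ pvOcc' seq m w s ≠ [] := by
    rw [PySem.Dict.contains_iff_mem_keys, hkeys, PySem.Set.mem_ofList, hocc]
    simp [List.filter_eq_nil_iff, List.mem_map]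
  have hgetD : D.getD s [] = pvOcc' seq m w s := by
    have : D = (P.map (fun i => (pvSub seq w i, i))).foldl
        (fun d p => d.modify p.1 [] (fun l => l ++ [p.2])) PySem.Dict.empty := by
      rw [hD, List.foldl_map]
    rw [this, PySem.Dict.getD_foldl_modify_append, List.filter_map, hocc]
    simp [Function.comp_def]
  by_cases h : pvOcc' seq m w s = []
  · rw [if_pos h, PySem.Dict.get?_eq_none_iff_contains]
    rcases Bool.eq_false_or_eq_true (D.contains s) with hc | hc
    · exact absurd (hcont.mp hc) (by simp [h])
    · exact hc
  · rw [if_neg h]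
    have hc : D.contains s = true := hcont.mpr h
    cases hg : D.get? s with
    | none => rw [PySem.Dict.get?_eq_none_iff_contains] at hg; rw [hg] at hc; cases hc
    | some v =>
        have := hgetD
        rw [PySem.Dict.getD_eq_get?_getD, hg] at this
        simp only [Option.getD_some] at this
        rw [this]

theorem pv_occ'_eq (seq : String) (m : List (String × List Int)) (w : Int)
    (p : String × List Int) (hp : p ∈ m) : pvOcc' seq m w p.1 = pvOcc seq w p.1 := by
  unfold pvOcc' pvOcc
  apply List.filter_congr
  intro i _
  by_cases h : pvSub seq w i == p.1
  · simp only [h, Bool.and_true]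
    exact List.any_eq_true.mpr ⟨p, hp, by simp [beq_iff_eq.mp h]⟩
  · simp [h]

theorem pv_B_pre (seq : String) (m : List (String × List Int)) (w : Int) :
    getHits_alt seq m w =
      PySem.List.sorted (m.flatMap (fun p => p.2.flatMap (fun q => (pvOcc seq w p.1).map (fun i => (q, i))))) (fun h => h.2) := by
  unfold getHits_alt
  simp only [pv_seqidx_get?]
  rw [PySem.List.foldl_congr_mem m _
    (fun acc p => acc ++ p.2.flatMap (fun q => (pvOcc seq w p.1).map (fun i => (q, i)))) [] ?_,
    PySem.List.foldl_append_eq_flatMap]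
  · simp
  · intro acc p hp
    simp only [pv_occ'_eq seq m w p hp]
    by_cases h : pvOcc seq w p.1 = [] <;> simp [h]

theorem pv_insertBy_skip (x : Int × Int) (l1 l2 : List (Int × Int))
    (h1 : ∀ y ∈ l1, ¬ x.2 < y.2) :
    PySem.List.insertBy (fun a b => decide (a.2 < b.2)) x (l1 ++ l2)
      = l1 ++ PySem.List.insertBy (fun a b => decide (a.2 < b.2)) x l2 := by
  induction l1 with
  | nil => simp
  | cons a l1' ih =>
      have ha : ¬ x.2 < a.2 := h1 a (by simp)
      simp only [List.cons_append, PySem.List.insertBy, decide_eq_true_eq, if_neg ha]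
      rw [ih (fun y hy => h1 y (by simp [hy]))]

theorem pv_insertBy_front (x : Int × Int) (l2 : List (Int × Int))
    (h2 : ∀ y ∈ l2, x.2 < y.2) :
    PySem.List.insertBy (fun a b => decide (a.2 < b.2)) x l2 = x :: l2 := by
  cases l2 with
  | nil => simp [PySem.List.insertBy]
  | cons a t => simp [PySem.List.insertBy, h2 a (by simp)]

theorem pv_insertBy_chunks (ks : List Int) (hks : ks.Pairwise (· < ·)) (x : Int × Int) (hx : x.2 ∈ ks)
    (p : List (Int × Int)) :
    PySem.List.insertBy (fun a b => decide (a.2 < b.2)) x (pvChunks ks p) = pvChunks ks (p ++ [x]) := by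
  induction ks generalizing p with
  | nil => cases hx
  | cons k ks' ih =>
      rw [List.pairwise_cons] at hks
      obtain ⟨hk, hks'⟩ := hks
      unfold pvChunks
      rw [List.flatMap_cons]
      have hfa : ∀ k', k' ∈ ks' → (p ++ [x]).filter (fun z => z.2 == k') = p.filter (fun z => z.2 == k') ∨ x.2 = k' := by
        intro k' hk'
        by_cases hxx : x.2 = k'
        · exact Or.inr hxx
        · left; rw [List.filter_append]; simp [hxx]
      by_cases hxk : x.2 = k
      · have h1 : ∀ y ∈ p.filter (fun z => z.2 == k), ¬ x.2 < y.2 := by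
          intro y hy
          have := (List.mem_filter.mp hy).2
          simp only [beq_iff_eq] at this
          omega
        have h2 : ∀ y ∈ ks'.flatMap (fun k' => p.filter (fun z => z.2 == k')), x.2 < y.2 := by
          intro y hy
          simp only [List.mem_flatMap, List.mem_filter, beq_iff_eq] at hy
          obtain ⟨k', hk', _, hyk⟩ := hy
          have := hk k' hk'
          omega
        rw [pv_insertBy_skip _ _ _ h1, pv_insertBy_front _ _ h2]
        conv_rhs => rw [List.flatMap_cons]
        have hrest : ks'.flatMap (fun k' => (p ++ [x]).filter (fun z => z.2 == k'))
            = ks'.flatMap (fun k' => p.filter (fun z => z.2 == k')) := by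
          apply List.flatMap_congr
          intro k' hk'
          rcases hfa k' hk' with h | h
          · exact h
          · exact absurd (hk k' hk') (by omega)
        rw [hrest, List.filter_append]
        simp [hxk]
      · have hx' : x.2 ∈ ks' := by cases hx with | head => exact absurd rfl hxk | tail _ h => exact h
        have h1 : ∀ y ∈ p.filter (fun z => z.2 == k), ¬ x.2 < y.2 := by
          intro y hy
          have := (List.mem_filter.mp hy).2
          simp only [beq_iff_eq] at this
          have := hk x.2 hx'
          omega
        rw [pv_insertBy_skip _ _ _ h1]
        simp only [pvChunks] at ih
        rw [ih hks' hx']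
        conv_rhs => rw [List.flatMap_cons]
        rw [List.filter_append]
        simp [hxk]

theorem pv_fold_chunks (ks : List Int) (hks : ks.Pairwise (· < ·)) (xs : List (Int × Int))
    (hxs : ∀ x ∈ xs, x.2 ∈ ks) (p : List (Int × Int)) :
    xs.foldl (fun acc x => PySem.List.insertBy (fun a b => decide (a.2 < b.2)) x acc) (pvChunks ks p)
      = pvChunks ks (p ++ xs) := by
  induction xs generalizing p with
  | nil => simp
  | cons x xs' ih =>
      rw [List.foldl_cons, pv_insertBy_chunks ks hks x (hxs x (by simp)) p,
        ih (fun y hy => hxs y (by simp [hy])) (p ++ [x])]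
      simp

theorem pv_sorted_chunks (ks : List Int) (hks : ks.Pairwise (· < ·)) (xs : List (Int × Int))
    (hxs : ∀ x ∈ xs, x.2 ∈ ks) :
    PySem.List.sorted xs (fun h => h.2) = pvChunks ks xs := by
  rw [PySem.List.sorted_eq_foldl_insertBy]
  have h0 : pvChunks ks ([] : List (Int × Int)) = [] := by simp [pvChunks]
  have := pv_fold_chunks ks hks xs hxs []
  rw [h0] at this
  rw [this]
  simp

theorem pv_flatMap_find (s : String) (k : Int) (m : List (String × List Int))
    (hm : (m.map Prod.fst).Nodup) :
    m.flatMap (fun p => if s == p.1 then p.2.map (fun q => (q, k)) else [])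
      = match List.find? (fun p => p.1 == s) m with
        | some p => p.2.map (fun q => (q, k))
        | none => [] := by
  induction m with
  | nil => simp
  | cons a m' ih =>
      rw [List.map_cons, List.nodup_cons] at hm
      obtain ⟨ha, hm'⟩ := hm
      rw [List.flatMap_cons]
      by_cases h : s = a.1
      · rw [List.find?_cons_of_pos (by simp [h]), if_pos (by simp [h])]
        have hz : m'.flatMap (fun p => if s == p.1 then p.2.map (fun q => (q, k)) else []) = [] := by
          apply List.flatMap_eq_nil_iff.mpr
          intro p hp
          rw [if_neg]
          simp only [beq_iff_eq]
          intro hsp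
          have hap : a.1 = p.1 := by rw [← h, hsp]
          exact ha (by rw [hap]; exact List.mem_map_of_mem hp)
        rw [hz]
        simp
      · rw [List.find?_cons_of_neg (by simp [Ne.symm h]), if_neg (by simp [h])]
        rw [List.nil_append, ih hm']

theorem pv_chunks_eq_A (seq : String) (m : List (String × List Int)) (w : Int)
    (hm : (m.map Prod.fst).Nodup) :
    pvChunks (pvPos seq w) (m.flatMap (fun p => p.2.flatMap (fun q => (pvOcc seq w p.1).map (fun i => (q, i)))))
      = (pvPos seq w).flatMap (pvGrp seq m w) := by
  unfold pvChunks
  apply List.flatMap_congr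
  intro k hkP
  have hfk : (pvPos seq w).filter (fun i => i == k) = [k] := by
    have h1 : (pvPos seq w).filter (fun i => decide (i = k)) = List.replicate ((pvPos seq w).count k) k := List.filter_eq k
    have h2 : (pvPos seq w).count k = 1 :=
      List.count_eq_one_of_mem (by unfold pvPos; exact PySem.List.nodup_pyRange_one 0 _) hkP
    rw [h2] at h1
    simpa using h1
  have hocc : ∀ s : String, (pvOcc seq w s).filter (fun i => i == k)
      = if pvSub seq w k == s then [k] else [] := by
    intro s
    unfold pvOcc
    rw [List.filter_comm, hfk]
    by_cases h : pvSub seq w k == s <;> simp [List.filter, h]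
  have step1 : (m.flatMap fun p => p.2.flatMap fun q => (pvOcc seq w p.1).map fun i => (q, i)).filter (fun x => x.2 == k)
      = m.flatMap (fun p => if pvSub seq w k == p.1 then p.2.map (fun q => (q, k)) else []) := by
    rw [List.filter_flatMap]
    apply List.flatMap_congr
    intro p _
    rw [List.filter_flatMap]
    have hq : ∀ q : Int, ((pvOcc seq w p.1).map (fun i => (q, i))).filter (fun x => x.2 == k)
        = ((pvOcc seq w p.1).filter (fun i => i == k)).map (fun i => (q, i)) := by
      intro q
      rw [List.filter_map]
      rfl
    by_cases h : pvSub seq w k == p.1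
    · simp only [hq, hocc, if_pos h]
      simp only [List.map_cons, List.map_nil]
      rw [← List.map_eq_flatMap]
    · simp only [hq, hocc, if_neg h]
      simp
  rw [step1, pv_flatMap_find (pvSub seq w k) k m hm]
  unfold pvGrp
  rfl

-- ===== VERDICT (by name: the statement is the Claim_ definition above) =====
theorem getHits_spec : Claim_equal_getHits := by
  intro seq m w _hd hpre
  unfold Spec_getHits
  rw [pv_A_eq, pv_B_pre,
    pv_sorted_chunks (pvPos seq w) (PySem.List.pairwise_lt_pyRange_one 0 _) _ ?_,
    pv_chunks_eq_A seq m w hpre]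
  intro x hx
  simp only [List.mem_flatMap, List.mem_map] at hx
  obtain ⟨p, _, q, _, i, hi, rfl⟩ := hx
  exact List.mem_of_mem_filter hi
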